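-- pv_equiv track=rewrite | github.com/Awesome94/Algo_Python | exam.py | exam
-- ===== SOURCE A (Python) =====
-- def exam(v):
--     wrongAns = v.count(0)
--     correctAns = v.count(1)-wrongAns
--     numOfQtns = 0
--     n = len(v)
--     x = 0
--     if correctAns < 0:
--         return 0
--     if correctAns == wrongAns:
--         return 1
--     while x < n and correctAns >= numOfQtns:
--         if v[x] == 1:
--             correctAns -= 1
--             numOfQtns += 1
--         else:
--             numOfQtns -= 1
--             correctAns += 1
--         x += 1
--     return x
-- ===== SOURCE B (Python) =====
-- def exam(v):
--     c0 = v.count(1) - v.count(0)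
--     if c0 < 0:
--         return 0
--     if c0 == v.count(0):
--         return 1
--     prefix = [0]
--     for e in v:
--         prefix.append(prefix[-1] + (1 if e == 1 else -1))
--     for i, b in enumerate(prefix):
--         if 2 * b > c0:
--             return i
--     return len(v)
-- ===== Notes on version B (the rewrite author's own statement) =====
-- stated objective: alternative
-- what changed: Replaces the index-driven two-counter while loop (mutating correctAns/numOfQtns per step) by building the prefix-balance table once and scanning it for the first index whose doubled balance exceeds the initial score count(1)-count(0).
import Mathlib
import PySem

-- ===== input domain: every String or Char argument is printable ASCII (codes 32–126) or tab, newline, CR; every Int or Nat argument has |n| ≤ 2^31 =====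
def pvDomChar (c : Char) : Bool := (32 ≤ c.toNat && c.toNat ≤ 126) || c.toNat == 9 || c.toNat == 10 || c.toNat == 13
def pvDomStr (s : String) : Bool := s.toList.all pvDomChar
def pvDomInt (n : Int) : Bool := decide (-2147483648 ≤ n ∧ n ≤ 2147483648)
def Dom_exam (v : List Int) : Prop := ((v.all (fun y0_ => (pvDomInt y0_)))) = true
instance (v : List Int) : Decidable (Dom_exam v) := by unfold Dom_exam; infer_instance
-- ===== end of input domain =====

-- B replaces A's index-driven two-counter while loop by building the prefix-balance
-- table once and scanning it for the first index whose doubled balance exceeds the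
-- initial score (objective: alternative decomposition, same cost).

-- ===== PORT A =====
-- while loop with fuel = v.length: x increases by 1 each iteration and the loop
-- stops at x = n, so v.length iterations always suffice.
def examLoop (v : List Int) (n : Int) : Int → Int → Int → Nat → Int
  | _, _, x, 0 => x
  | correctAns, numOfQtns, x, fuel + 1 =>
    if x < n ∧ correctAns ≥ numOfQtns then
      match PySem.List.pyGet? v x with
      | some e =>
          if e = 1 then examLoop v n (correctAns - 1) (numOfQtns + 1) (x + 1) fuel
          else examLoop v n (correctAns + 1) (numOfQtns - 1) (x + 1) fuel
      | none => x  -- unreachable: x < n keeps v[x] in range, Python raises no IndexError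
    else x

def exam (v : List Int) : Int :=
  let wrongAns : Int := (v.count 0 : Int)
  let correctAns : Int := (v.count 1 : Int) - wrongAns
  let n : Int := (v.length : Int)
  if correctAns < 0 then 0
  else if correctAns = wrongAns then 1
  else examLoop v n correctAns 0 0 v.length

-- ===== PORT B =====
def exam_alt (v : List Int) : Int :=
  let c0 : Int := (v.count 1 : Int) - (v.count 0 : Int)
  if c0 < 0 then 0
  else if c0 = (v.count 0 : Int) then 1
  else
    let pref := v.foldl
      (fun p e => p ++ [(PySem.List.pyGet? p (-1)).getD 0 + (if e = 1 then 1 else -1)]) [0]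
    match (PySem.List.enumerate pref 0).find? (fun ib => decide (2 * ib.2 > c0)) with
    | some (i, _) => i
    | none => (v.length : Int)

-- ===== PRECONDITION & SPEC =====
def Spec_exam (v : List Int) (out : Int) : Prop := out = exam_alt v
instance (v : List Int) (out : Int) : Decidable (Spec_exam v out) := by unfold Spec_exam; infer_instance

-- ===== CLAIM (what is proved, stated in full; the proofs are below) =====
def Claim_equal_exam : Prop := ∀ (v : List Int), Dom_exam v → Spec_exam v (exam v)

-- ===== LEMMAS AND PROOFS =====

-- running balance sequence (without its leading element)
def pvScan (b : Int) : List Int → List Int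
  | [] => []
  | e :: t => (b + (if e = 1 then 1 else -1)) :: pvScan (b + (if e = 1 then 1 else -1)) t

-- first index whose doubled balance exceeds c0, capped at the list length
def pvF (c0 : Int) : Int → List Int → Nat
  | _, [] => 0
  | b, e :: t => if 2 * b > c0 then 0 else pvF c0 (b + (if e = 1 then 1 else -1)) t + 1

theorem pvBuild (v : List Int) : ∀ (p : List Int) (x : Int), p.getLast? = some x →
    v.foldl (fun p e => p ++ [(PySem.List.pyGet? p (-1)).getD 0 + (if e = 1 then 1 else -1)]) p
      = p ++ pvScan x v := by
  induction v with
  | nil => intro p x _; simp [pvScan]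
  | cons e t ih =>
    intro p x hx
    rw [List.foldl_cons]
    have hlast : (PySem.List.pyGet? p (-1)).getD 0 = x := by
      rw [PySem.List.pyGet?_neg_one, hx]; rfl
    rw [hlast, ih (p ++ [x + (if e = 1 then 1 else -1)]) (x + (if e = 1 then 1 else -1))
        (by simp)]
    simp [pvScan]

theorem pvSearch (c0 : Int) : ∀ (rest : List Int) (b s : Int),
    (match (PySem.List.enumerate (b :: pvScan b rest) s).find? (fun ib => decide (2 * ib.2 > c0)) with
      | some (i, _) => i
      | none => s + (rest.length : Int)) = s + (pvF c0 b rest : Int) := by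
  intro rest
  induction rest with
  | nil =>
    intro b s
    rw [PySem.List.enumerate_cons]
    by_cases h : 2 * b > c0
    · rw [List.find?_cons_of_pos (by simpa using h)]
      simp [pvF]
    · rw [List.find?_cons_of_neg (by simpa using h)]
      simp [pvScan, pvF, PySem.List.enumerate_nil]
  | cons e t ih =>
    intro b s
    rw [PySem.List.enumerate_cons]
    by_cases h : 2 * b > c0
    · rw [List.find?_cons_of_pos (by simpa using h)]
      simp [pvF, h]
    · rw [List.find?_cons_of_neg (by simpa using h)]
      have hscan : pvScan b (e :: t)
          = (b + (if e = 1 then 1 else -1)) :: pvScan (b + (if e = 1 then 1 else -1)) t := rfl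
      rw [hscan]
      have hcast : s + ((e :: t).length : Int) = (s + 1) + (t.length : Int) := by
        simp only [List.length_cons]; push_cast; ring
      rw [hcast, ih (b + (if e = 1 then 1 else -1)) (s + 1)]
      have hF : (pvF c0 b (e :: t) : Int) = (pvF c0 (b + (if e = 1 then 1 else -1)) t : Int) + 1 := by
        simp [pvF, h]
      rw [hF]; ring

theorem pvLoop (c0 : Int) : ∀ (fuel : Nat) (rest pre : List Int) (b : Int),
    rest.length ≤ fuel →
    examLoop (pre ++ rest) (((pre ++ rest).length : Int)) (c0 - b) b (pre.length : Int) fuel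
      = (pre.length : Int) + (pvF c0 b rest : Int) := by
  intro fuel
  induction fuel with
  | zero =>
    intro rest pre b h
    have : rest = [] := List.eq_nil_of_length_eq_zero (Nat.le_zero.mp h)
    subst this
    simp [examLoop, pvF]
  | succ f ih =>
    intro rest pre b h
    cases rest with
    | nil =>
      simp only [examLoop]
      split_ifs with hcond
      · exact absurd hcond.1 (by simp)
      · simp [pvF]
    | cons e t =>
      by_cases hb : 2 * b > c0
      · simp only [examLoop]
        split_ifs with hcond
        · exact absurd hcond.2 (by omega)
        · simp [pvF, hb]
      · have hc : (pre.length : Int) < ((pre ++ e :: t).length : Int) ∧ c0 - b ≥ b := by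
          constructor
          · simp
          · omega
        simp only [examLoop, if_pos hc, PySem.List.pyGet?_append_length]
        have hlt : t.length ≤ f := by simpa using h
        simp only [List.length_append]
        by_cases he : e = 1
        · have hrec := ih t (pre ++ [e]) (b + 1) hlt
          simp only [List.append_assoc, List.singleton_append, List.length_append,
            List.length_singleton] at hrec
          rw [if_pos he]
          rw [show c0 - b - 1 = c0 - (b + 1) by ring,
              show (pre.length : Int) + 1 = ((pre.length + 1 : Nat) : Int) by push_cast; ring]
          rw [hrec]
          simp only [pvF, if_neg hb, if_pos he]
          push_cast; ring
        · have hrec := ih t (pre ++ [e]) (b + (-1)) hlt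
          simp only [List.append_assoc, List.singleton_append, List.length_append,
            List.length_singleton] at hrec
          rw [if_neg he]
          rw [show c0 - b + 1 = c0 - (b + (-1)) by ring,
              show b - 1 = b + (-1) by ring,
              show (pre.length : Int) + 1 = ((pre.length + 1 : Nat) : Int) by push_cast; ring]
          rw [hrec]
          simp only [pvF, if_neg hb, if_neg he]
          push_cast; ring

-- ===== VERDICT (by name: the statement is the Claim_ definition above) =====
theorem exam_spec : Claim_equal_exam := by
  intro v _
  unfold Spec_exam exam exam_alt
  simp only []
  by_cases h1 : ((v.count 1 : Int) - (v.count 0 : Int)) < 0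
  · simp [h1]
  · by_cases h2 : ((v.count 1 : Int) - (v.count 0 : Int)) = (v.count 0 : Int)
    · simp [h2]
    · rw [if_neg h1, if_neg h1, if_neg h2, if_neg h2]
      rw [pvBuild v [0] 0 (by simp)]
      have hl := pvLoop ((v.count 1 : Int) - (v.count 0 : Int)) v.length v [] 0 (le_refl _)
      simp only [List.nil_append, List.length_nil, Nat.cast_zero, sub_zero, zero_add] at hl
      rw [hl]
      have hs := pvSearch ((v.count 1 : Int) - (v.count 0 : Int)) v 0 0
      simp only [zero_add] at hs
      have h01 : ([(0 : Int)] ++ pvScan 0 v) = (0 : Int) :: pvScan 0 v := by simp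
      rw [h01]
      rw [← hs]
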